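-- pv_equiv track=rewrite | github.com/harryphiles/encar-search | utils.py | identify_differences
-- ===== SOURCE A (Python) =====
-- def identify_differences(db: list, encar: list) -> tuple[list[str]]:
--     """returns (new, intersection, unavailable) for sorted db and api inputs"""
--     db, encar = sorted(db[:]), sorted(encar[:])
--     len_db, len_api = len(db), len(encar)
--     pointer_db, pointer_api = 0, 0
--     new, intersection, unavailable = [], [], []
--
--     while pointer_db < len_db and pointer_api < len_api:
--         db_data = db[pointer_db]
--         api_data = encar[pointer_api]
--
--         if db_data == api_data:
--             intersection.append(db_data)
--             pointer_db += 1
--             pointer_api += 1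
--         elif db_data < api_data:
--             unavailable.append(db_data)
--             pointer_db += 1
--         else:
--             new.append(api_data)
--             pointer_api += 1
--
--     # Add remaining elements from DB
--     while pointer_db < len_db:
--         unavailable.append(db[pointer_db])
--         pointer_db += 1
--
--     # Add remaining elements from API
--     while pointer_api < len_api:
--         new.append(encar[pointer_api])
--         pointer_api += 1
--
--     return new, intersection, unavailable
-- ===== SOURCE B (Python) =====
-- def _counts(xs):
--     c = {}
--     for x in xs:
--         c[x] = c.get(x, 0) + 1
--     return c
--
--
-- def identify_differences(db: list, encar: list) -> tuple[list[str]]: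
--     """returns (new, intersection, unavailable) via multiset count arithmetic"""
--     cd, ca = _counts(db), _counts(encar)
--     keys = list(dict.fromkeys(db + encar))
--     new = [k for k in keys for _ in range(ca.get(k, 0) - min(cd.get(k, 0), ca.get(k, 0)))]
--     intersection = [k for k in keys for _ in range(min(cd.get(k, 0), ca.get(k, 0)))]
--     unavailable = [k for k in keys for _ in range(cd.get(k, 0) - min(cd.get(k, 0), ca.get(k, 0)))]
--     return sorted(new), sorted(intersection), sorted(unavailable)
-- ===== Notes on version B (the rewrite author's own statement) =====
-- stated objective: alternative
-- what changed: Replaces the sort-both-then-two-pointer merge with multiset count arithmetic: build per-value counts of db and encar once, then emit min/clamped-difference many copies of each distinct value and sort each of the three result lists.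
import Mathlib
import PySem

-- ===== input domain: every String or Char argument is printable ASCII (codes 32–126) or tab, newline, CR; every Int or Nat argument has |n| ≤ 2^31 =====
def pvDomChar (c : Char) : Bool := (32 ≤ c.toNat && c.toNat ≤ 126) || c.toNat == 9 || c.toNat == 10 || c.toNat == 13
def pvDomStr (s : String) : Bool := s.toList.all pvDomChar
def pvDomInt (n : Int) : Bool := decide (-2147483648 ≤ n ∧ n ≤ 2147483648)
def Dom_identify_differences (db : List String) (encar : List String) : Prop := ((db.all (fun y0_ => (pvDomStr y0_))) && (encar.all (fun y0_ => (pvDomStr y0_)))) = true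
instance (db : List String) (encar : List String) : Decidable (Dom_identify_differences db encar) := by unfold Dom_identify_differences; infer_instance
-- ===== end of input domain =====

-- B reworks the two-pointer merge into multiset count arithmetic (per-key min/clamped-difference counts, then sort); alternative algorithm, same cost class.

-- ===== PORT A =====
-- the two trailing 'while' loops of A: append xs[i], i += 1 while i < len(xs)
def pvTail (xs : List String) (i : Nat) (acc : List String) : List String :=
  if _h : i < xs.length then pvTail xs (i + 1) (acc ++ [xs.getD i ""]) else acc
termination_by xs.length - i

-- A's main while loop over pointers into the two sorted lists; indices are always in range, so getD is exact
def pvMerge (d e : List String) (i j : Nat) (nw it un : List String) :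
    List String × List String × List String :=
  if _h : i < d.length ∧ j < e.length then
    let a := d.getD i ""
    let b := e.getD j ""
    if a = b then pvMerge d e (i + 1) (j + 1) nw (it ++ [a]) un
    else if a < b then pvMerge d e (i + 1) j nw it (un ++ [a])
    else pvMerge d e i (j + 1) (nw ++ [b]) it un
  else (pvTail e j nw, it, pvTail d i un)
termination_by (d.length - i) + (e.length - j)
decreasing_by all_goals omega

def identify_differences (db : List String) (encar : List String) : List String × List String × List String :=
  let d := PySem.List.sorted db (fun x => x) false
  let e := PySem.List.sorted encar (fun x => x) false
  pvMerge d e 0 0 [] [] []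

-- ===== PORT B =====
-- Source B's _counts: c[x] = c.get(x, 0) + 1 over xs
def pvCounts (xs : List String) : PySem.Dict String Int :=
  xs.foldl (fun c x => c.modify x 0 (fun v => v + 1)) PySem.Dict.empty

def identify_differences_alt (db : List String) (encar : List String) : List String × List String × List String :=
  let cd := pvCounts db
  let ca := pvCounts encar
  let keys := PySem.List.dedup (db ++ encar)
  let nw := keys.flatMap (fun k => List.replicate (ca.getD k 0 - min (cd.getD k 0) (ca.getD k 0)).toNat k)
  let it := keys.flatMap (fun k => List.replicate (min (cd.getD k 0) (ca.getD k 0)).toNat k)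
  let un := keys.flatMap (fun k => List.replicate (cd.getD k 0 - min (cd.getD k 0) (ca.getD k 0)).toNat k)
  (PySem.List.sorted nw (fun x => x) false,
   PySem.List.sorted it (fun x => x) false,
   PySem.List.sorted un (fun x => x) false)

-- ===== PRECONDITION & SPEC =====
def Spec_identify_differences (db : List String) (encar : List String) (out : List String × List String × List String) : Prop := out = identify_differences_alt db encar
instance (db : List String) (encar : List String) (out : List String × List String × List String) : Decidable (Spec_identify_differences db encar out) := by unfold Spec_identify_differences; infer_instance

-- ===== CLAIM (what is proved, stated in full; the proofs are below) =====
def Claim_equal_identify_differences : Prop := ∀ (db : List String) (encar : List String), Dom_identify_differences db encar → Spec_identify_differences db encar (identify_differences db encar)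

-- ===== LEMMAS AND PROOFS =====

-- clean recursive formulation of A's merge (proof device)
def pvMerge3 : List String → List String → List String × List String × List String
  | [], e => (e, [], [])
  | a :: d, [] => ([], [], a :: d)
  | a :: d, b :: e =>
    if a = b then
      let r := pvMerge3 d e
      (r.1, a :: r.2.1, r.2.2)
    else if a < b then
      let r := pvMerge3 d (b :: e)
      (r.1, r.2.1, a :: r.2.2)
    else
      let r := pvMerge3 (a :: d) e
      (b :: r.1, r.2.1, r.2.2)
termination_by d e => d.length + e.length

theorem pvMerge3_nil_left (e : List String) : pvMerge3 [] e = (e, [], []) := by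
  rw [pvMerge3]

theorem pvMerge3_nil_right (a : String) (d : List String) : pvMerge3 (a :: d) [] = ([], [], a :: d) := by
  rw [pvMerge3]

theorem pvMerge3_cons_eq {a b : String} (d e : List String) (h : a = b) :
    pvMerge3 (a :: d) (b :: e) = ((pvMerge3 d e).1, a :: (pvMerge3 d e).2.1, (pvMerge3 d e).2.2) := by
  rw [pvMerge3]; simp [h]

theorem pvMerge3_cons_lt {a b : String} (d e : List String) (h : ¬ a = b) (h2 : a < b) :
    pvMerge3 (a :: d) (b :: e) = ((pvMerge3 d (b :: e)).1, (pvMerge3 d (b :: e)).2.1, a :: (pvMerge3 d (b :: e)).2.2) := by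
  rw [pvMerge3]; simp [h, h2]

theorem pvMerge3_cons_gt {a b : String} (d e : List String) (h : ¬ a = b) (h2 : ¬ a < b) :
    pvMerge3 (a :: d) (b :: e) = (b :: (pvMerge3 (a :: d) e).1, (pvMerge3 (a :: d) e).2.1, (pvMerge3 (a :: d) e).2.2) := by
  rw [pvMerge3]; simp [h, h2]

theorem pvTail_eq (xs : List String) (i : Nat) (acc : List String) :
    pvTail xs i acc = acc ++ xs.drop i := by
  fun_induction pvTail xs i acc with
  | case1 i acc h ih =>
      rw [ih, List.drop_eq_getElem_cons h]
      simp [List.getD_eq_getElem?_getD, List.getElem?_eq_getElem h]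
  | case2 i acc h =>
      rw [List.drop_eq_nil_of_le (by omega), List.append_nil]

theorem pvMerge_eq (d e : List String) (i j : Nat) (nw it un : List String) :
    pvMerge d e i j nw it un =
      (nw ++ (pvMerge3 (d.drop i) (e.drop j)).1,
       it ++ (pvMerge3 (d.drop i) (e.drop j)).2.1,
       un ++ (pvMerge3 (d.drop i) (e.drop j)).2.2) := by
  fun_induction pvMerge d e i j nw it un with
  | case1 i j nw it un h a b hab ih =>
      have hd' : d.drop i = a :: d.drop (i + 1) := by
        rw [List.drop_eq_getElem_cons h.1]
        simp [a, List.getD_eq_getElem?_getD, List.getElem?_eq_getElem h.1]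
      have he' : e.drop j = b :: e.drop (j + 1) := by
        rw [List.drop_eq_getElem_cons h.2]
        simp [b, List.getD_eq_getElem?_getD, List.getElem?_eq_getElem h.2]
      rw [ih, hd', he', pvMerge3_cons_eq _ _ hab]
      simp
  | case2 i j nw it un h a b hab hlt ih =>
      have hd' : d.drop i = a :: d.drop (i + 1) := by
        rw [List.drop_eq_getElem_cons h.1]
        simp [a, List.getD_eq_getElem?_getD, List.getElem?_eq_getElem h.1]
      have he' : e.drop j = b :: e.drop (j + 1) := by
        rw [List.drop_eq_getElem_cons h.2]
        simp [b, List.getD_eq_getElem?_getD, List.getElem?_eq_getElem h.2]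
      rw [ih, hd', he', pvMerge3_cons_lt _ _ hab hlt]
      simp
  | case3 i j nw it un h a b hab hlt ih =>
      have hd' : d.drop i = a :: d.drop (i + 1) := by
        rw [List.drop_eq_getElem_cons h.1]
        simp [a, List.getD_eq_getElem?_getD, List.getElem?_eq_getElem h.1]
      have he' : e.drop j = b :: e.drop (j + 1) := by
        rw [List.drop_eq_getElem_cons h.2]
        simp [b, List.getD_eq_getElem?_getD, List.getElem?_eq_getElem h.2]
      rw [ih, hd', he', pvMerge3_cons_gt _ _ hab hlt]
      simp
  | case4 i j nw it un h =>
      rw [pvTail_eq, pvTail_eq]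
      rcases Nat.lt_or_ge i d.length with hi | hi
      · have hj : e.length ≤ j := by omega
        have hd' : d.drop i = d[i] :: d.drop (i + 1) := List.drop_eq_getElem_cons hi
        rw [List.drop_eq_nil_of_le hj, hd', pvMerge3_nil_right]
        simp
      · rw [List.drop_eq_nil_of_le hi, pvMerge3_nil_left]
        simp

theorem pvMerge3_spec (d e : List String) :
    d.Pairwise (· ≤ ·) → e.Pairwise (· ≤ ·) →
    ((pvMerge3 d e).1 : Multiset String) = (↑e - ↑d : Multiset String)
    ∧ ((pvMerge3 d e).2.1 : Multiset String) = (↑d ∩ ↑e : Multiset String)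
    ∧ ((pvMerge3 d e).2.2 : Multiset String) = (↑d - ↑e : Multiset String)
    ∧ (pvMerge3 d e).1.Pairwise (· ≤ ·)
    ∧ (pvMerge3 d e).2.1.Pairwise (· ≤ ·)
    ∧ (pvMerge3 d e).2.2.Pairwise (· ≤ ·) := by
  fun_induction pvMerge3 d e with
  | case1 e =>
      intro _ he
      refine ⟨by simp, by simp, by simp, he, by simp, by simp⟩
  | case2 a d =>
      intro hda _
      refine ⟨by simp, by simp, by simp, by simp, by simp, hda⟩
  | case3 d a e r ih =>
      intro hda heb
      obtain ⟨ha, hd⟩ := List.pairwise_cons.mp hda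
      obtain ⟨hb, he⟩ := List.pairwise_cons.mp heb
      obtain ⟨h1, h2, h3, p1, p2, p3⟩ := ih hd he
      have hr : r = pvMerge3 d e := rfl
      rw [hr]
      refine ⟨?_, ?_, ?_, p1, ?_, p3⟩
      · dsimp only
        rw [h1]
        refine Multiset.ext.mpr fun x => ?_
        by_cases hx : x = a <;>
          simp [← Multiset.cons_coe, hx]
      · dsimp only
        rw [← Multiset.cons_coe, h2]
        refine Multiset.ext.mpr fun x => ?_
        by_cases hx : x = a <;>
          simp [← Multiset.cons_coe, hx]
      · dsimp only
        rw [h3]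
        refine Multiset.ext.mpr fun x => ?_
        by_cases hx : x = a <;>
          simp [← Multiset.cons_coe, hx]
      · refine List.pairwise_cons.mpr ⟨fun x hx => ?_, p2⟩
        have : x ∈ (↑d ∩ ↑e : Multiset String) := by
          rw [← h2]; exact Multiset.mem_coe.mpr hx
        exact ha x (Multiset.mem_coe.mp (Multiset.mem_inter.mp this).1)
  | case4 a d b e hab hlt r ih =>
      intro hda heb
      obtain ⟨ha, hd⟩ := List.pairwise_cons.mp hda
      obtain ⟨hb, he⟩ := List.pairwise_cons.mp heb
      obtain ⟨h1, h2, h3, p1, p2, p3⟩ := ih hd heb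
      have hnm : a ∉ b :: e := by
        intro hmem
        rcases List.mem_cons.mp hmem with h | h
        · exact hab h
        · exact absurd (lt_of_lt_of_le hlt (hb _ h)) (lt_irrefl a)
      have hcnt : List.count a (b :: e) = 0 := List.count_eq_zero.mpr hnm
      have hr : r = pvMerge3 d (b :: e) := rfl
      rw [hr]
      refine ⟨?_, ?_, ?_, p1, p2, ?_⟩
      · dsimp only
        rw [h1]
        refine Multiset.ext.mpr fun x => ?_
        by_cases hx : x = a <;>
          simp only [← Multiset.cons_coe, Multiset.count_sub, Multiset.count_cons, hx,
            Multiset.coe_count] <;> simp_all [List.count_cons]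
      · dsimp only
        rw [h2]
        refine Multiset.ext.mpr fun x => ?_
        by_cases hx : x = a <;>
          simp only [← Multiset.cons_coe, Multiset.count_inter, Multiset.count_cons, hx,
            Multiset.coe_count] <;> simp_all [List.count_cons]
      · dsimp only
        rw [← Multiset.cons_coe, h3]
        refine Multiset.ext.mpr fun x => ?_
        by_cases hx : x = a <;>
          simp only [← Multiset.cons_coe, Multiset.count_sub, Multiset.count_cons, hx,
            Multiset.coe_count] <;> simp_all [List.count_cons]
      · refine List.pairwise_cons.mpr ⟨fun x hx => ?_, p3⟩
        have hms : x ∈ (↑d - ↑(b :: e) : Multiset String) := by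
          rw [← h3]; exact Multiset.mem_coe.mpr hx
        have : x ∈ (↑d : Multiset String) := by
          rw [← Multiset.count_pos] at hms ⊢
          rw [Multiset.count_sub] at hms
          omega
        exact ha x (Multiset.mem_coe.mp this)
  | case5 a d b e hab hlt r ih =>
      intro hda heb
      obtain ⟨ha, hd⟩ := List.pairwise_cons.mp hda
      obtain ⟨hb, he⟩ := List.pairwise_cons.mp heb
      obtain ⟨h1, h2, h3, p1, p2, p3⟩ := ih hda he
      have hba : b < a := lt_of_le_of_ne (not_lt.mp hlt) (fun h => hab h.symm)
      have hnm : b ∉ a :: d := by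
        intro hmem
        rcases List.mem_cons.mp hmem with h | h
        · exact hba.ne h
        · exact absurd (lt_of_lt_of_le hba (ha _ h)) (lt_irrefl b)
      have hcnt : List.count b (a :: d) = 0 := List.count_eq_zero.mpr hnm
      have hr : r = pvMerge3 (a :: d) e := rfl
      rw [hr]
      refine ⟨?_, ?_, ?_, ?_, p2, p3⟩
      · dsimp only
        rw [← Multiset.cons_coe, h1]
        refine Multiset.ext.mpr fun x => ?_
        by_cases hx : x = b <;>
          simp only [← Multiset.cons_coe, Multiset.count_sub, Multiset.count_cons, hx,
            Multiset.coe_count] <;> simp_all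
      · dsimp only
        rw [h2]
        refine Multiset.ext.mpr fun x => ?_
        by_cases hx : x = b <;>
          simp only [← Multiset.cons_coe, Multiset.count_inter, Multiset.count_cons, hx,
            Multiset.coe_count] <;> simp_all
      · dsimp only
        rw [h3]
        refine Multiset.ext.mpr fun x => ?_
        by_cases hx : x = b <;>
          simp only [← Multiset.cons_coe, Multiset.count_sub, Multiset.count_cons, hx,
            Multiset.coe_count] <;> simp_all
      · refine List.pairwise_cons.mpr ⟨fun x hx => ?_, p1⟩
        have hms : x ∈ (↑e - ↑(a :: d) : Multiset String) := by
          rw [← h1]; exact Multiset.mem_coe.mpr hx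
        have : x ∈ (↑e : Multiset String) := by
          rw [← Multiset.count_pos] at hms ⊢
          rw [Multiset.count_sub] at hms
          omega
        exact hb x (Multiset.mem_coe.mp this)

theorem pvCounts_getD (xs : List String) (x : String) :
    (pvCounts xs).getD x 0 = (xs.count x : Int) :=
  PySem.Dict.getD_counter xs x

theorem count_flatMap_replicate (keys : List String) (g : String → Nat) (hnd : keys.Nodup) (x : String) :
    (keys.flatMap (fun k => List.replicate (g k) k)).count x = if x ∈ keys then g x else 0 := by
  induction keys with
  | nil => simp
  | cons k ks ih =>
      rcases List.nodup_cons.mp hnd with ⟨hk, hnd'⟩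
      by_cases hx : x = k
      · subst hx
        simp [List.count_append, ih hnd', hk]
      · simp [List.count_append, List.count_replicate, ih hnd', Ne.symm hx, hx]

theorem sorted_eq_of_coe_pairwise (xs l : List String)
    (hperm : (↑l : Multiset String) = ↑xs) (hp : l.Pairwise (· ≤ ·)) :
    PySem.List.sorted xs (fun x => x) false = l := by
  rw [PySem.List.sorted_eq_sorted_of_perm xs l (fun x => x) (fun a b h => h)
    (Multiset.coe_eq_coe.mp hperm).symm]
  exact PySem.List.sorted_eq_self_of_pairwise l _ hp

theorem flatMap_coe_count (db encar : List String) (g : String → Nat) (x : String) :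
    Multiset.count x
      (↑((PySem.List.dedup (db ++ encar)).flatMap (fun k => List.replicate (g k) k)) : Multiset String)
      = if x ∈ db ∨ x ∈ encar then g x else 0 := by
  rw [Multiset.coe_count,
    count_flatMap_replicate _ _ (PySem.List.nodup_dedup (db ++ encar)) x]
  simp

-- ===== VERDICT (by name: the statement is the Claim_ definition above) =====
theorem identify_differences_spec : Claim_equal_identify_differences := by
  intro db encar _
  unfold Spec_identify_differences
  unfold identify_differences
  simp only [identify_differences_alt]
  set d := PySem.List.sorted db (fun x => x) false with hd_def
  set e := PySem.List.sorted encar (fun x => x) false with he_def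
  have hd : d.Pairwise (· ≤ ·) := PySem.List.sorted_pairwise db (fun x => x)
  have he : e.Pairwise (· ≤ ·) := PySem.List.sorted_pairwise encar (fun x => x)
  have hdm : (↑d : Multiset String) = ↑db :=
    Multiset.coe_eq_coe.mpr (PySem.List.sorted_perm db (fun x => x) false)
  have hem : (↑e : Multiset String) = ↑encar :=
    Multiset.coe_eq_coe.mpr (PySem.List.sorted_perm encar (fun x => x) false)
  obtain ⟨h1, h2, h3, p1, p2, p3⟩ := pvMerge3_spec d e hd he
  rw [pvMerge_eq]
  simp only [List.drop_zero, List.nil_append]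
  refine Prod.ext ?_ (Prod.ext ?_ ?_)
  · dsimp only
    refine (sorted_eq_of_coe_pairwise _ _ ?_ p1).symm
    rw [h1, hdm, hem]
    refine Multiset.ext.mpr fun x => ?_
    rw [flatMap_coe_count]
    rw [Multiset.count_sub, Multiset.coe_count, Multiset.coe_count]
    by_cases hx : x ∈ db ∨ x ∈ encar
    · simp only [hx, if_true, pvCounts_getD]
      omega
    · push Not at hx
      simp [hx.1, hx.2, List.count_eq_zero.mpr hx.1, List.count_eq_zero.mpr hx.2]
  · dsimp only
    refine (sorted_eq_of_coe_pairwise _ _ ?_ p2).symm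
    rw [h2, hdm, hem]
    refine Multiset.ext.mpr fun x => ?_
    rw [flatMap_coe_count]
    rw [Multiset.count_inter, Multiset.coe_count, Multiset.coe_count]
    by_cases hx : x ∈ db ∨ x ∈ encar
    · simp only [hx, if_true, pvCounts_getD]
      omega
    · push Not at hx
      simp [hx.1, hx.2, List.count_eq_zero.mpr hx.1, List.count_eq_zero.mpr hx.2]
  · dsimp only
    refine (sorted_eq_of_coe_pairwise _ _ ?_ p3).symm
    rw [h3, hdm, hem]
    refine Multiset.ext.mpr fun x => ?_
    rw [flatMap_coe_count]
    rw [Multiset.count_sub, Multiset.coe_count, Multiset.coe_count]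
    by_cases hx : x ∈ db ∨ x ∈ encar
    · simp only [hx, if_true, pvCounts_getD]
      omega
    · push Not at hx
      simp [hx.1, hx.2, List.count_eq_zero.mpr hx.1, List.count_eq_zero.mpr hx.2]
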